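-- pv_equiv track=rewrite | github.com/AiShieldsOrg/AiShieldsWeb | overreliance/test_group_and_combine.py | group_and_combine
-- ===== SOURCE A (Python) =====
-- def group_and_combine(lst):
--     # Create a dictionary to group the strings by their scores
--     score_dict = {}
--     for score, string in lst:
--         if score in score_dict:
--             score_dict[score].append(string)
--         else:
--             score_dict[score] = [string]
--
--     # Create a new list with summed scores and concatenated strings
--     new_lst = []
--     for score, strings in score_dict.items():
--         combined_string = ' '.join(strings)
--         new_lst.append([sum([score]), combined_string])
--
--     return new_lst
-- ===== SOURCE B (Python) =====
-- def group_and_combine(lst):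
--     # Distinct scores in order of first appearance, then one gathering pass per score.
--     seen = []
--     for score, _ in lst:
--         if score not in seen:
--             seen.append(score)
--     result = []
--     for score in seen:
--         strings = [s for sc, s in lst if sc == score]
--         result.append([sum([score]), ' '.join(strings)])
--     return result
-- ===== Notes on version B (the rewrite author's own statement) =====
-- stated objective: alternative
-- what changed: Replaces the dict-of-lists accumulator with a first-appearance distinct-scores scan followed by one filtering pass per distinct score; no dict is built.
import Mathlib
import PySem

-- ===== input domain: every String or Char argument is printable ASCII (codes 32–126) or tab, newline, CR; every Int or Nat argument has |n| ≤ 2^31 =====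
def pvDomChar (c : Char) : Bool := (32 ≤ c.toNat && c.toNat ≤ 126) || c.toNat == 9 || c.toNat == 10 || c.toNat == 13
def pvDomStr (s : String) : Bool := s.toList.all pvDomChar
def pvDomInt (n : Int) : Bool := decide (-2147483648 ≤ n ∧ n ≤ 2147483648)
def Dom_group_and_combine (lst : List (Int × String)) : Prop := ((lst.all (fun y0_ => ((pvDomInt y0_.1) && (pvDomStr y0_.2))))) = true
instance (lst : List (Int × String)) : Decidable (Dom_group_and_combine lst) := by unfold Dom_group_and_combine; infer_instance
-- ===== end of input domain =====

-- B replaces A's dict-of-lists accumulator with a distinct-scores scan plus one filtering pass per score (alternative decomposition, same results).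

-- ===== PORT A =====
def group_and_combine (lst : List (Int × String)) : List (Int × String) :=
  let score_dict : PySem.Dict Int (List String) :=
    lst.foldl (fun d p =>
      if d.contains p.1 then d.insert p.1 (d.getD p.1 [] ++ [p.2])
      else d.insert p.1 [p.2]) PySem.Dict.empty
  score_dict.items.foldl (fun new_lst p =>
    new_lst ++ [(List.sum [p.1], PySem.Str.join " " p.2)]) []

-- ===== PORT B =====
def group_and_combine_alt (lst : List (Int × String)) : List (Int × String) :=
  let seen : List Int :=
    lst.foldl (fun seen p => if p.1 ∈ seen then seen else seen ++ [p.1]) []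
  seen.foldl (fun res score =>
    res ++ [(List.sum [score],
             PySem.Str.join " " ((lst.filter (fun p => p.1 == score)).map (·.2)))]) []

-- ===== PRECONDITION & SPEC =====
def Spec_group_and_combine (lst : List (Int × String)) (out : List (Int × String)) : Prop := out = group_and_combine_alt lst
instance (lst : List (Int × String)) (out : List (Int × String)) : Decidable (Spec_group_and_combine lst out) := by unfold Spec_group_and_combine; infer_instance

-- ===== CLAIM (what is proved, stated in full; the proofs are below) =====
def Claim_equal_group_and_combine : Prop := ∀ (lst : List (Int × String)), Dom_group_and_combine lst → Spec_group_and_combine lst (group_and_combine lst)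

-- ===== LEMMAS AND PROOFS =====

-- A's dict loop body is exactly Dict.modify with default [].
theorem stepA_eq_modify (d : PySem.Dict Int (List String)) (p : Int × String) :
    (if d.contains p.1 then d.insert p.1 (d.getD p.1 [] ++ [p.2])
     else d.insert p.1 [p.2]) = d.modify p.1 [] (· ++ [p.2]) := by
  by_cases h : d.contains p.1
  · simp [h, PySem.Dict.modify]
  · have h' : d.contains p.1 = false := by simpa using h
    simp [h, PySem.Dict.modify, PySem.Dict.getD_of_not_contains]

-- B's seen loop body is exactly PySem.Set.add.
theorem stepB_eq_add (s : List Int) (x : Int) :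
    (if x ∈ s then s else s ++ [x]) = PySem.Set.add s x := by
  simp [PySem.Set.add, PySem.Set.contains]

theorem foldl_append_map {α β : Type} (l : List α) (f : α → β) (acc : List β) :
    l.foldl (fun r x => r ++ [f x]) acc = acc ++ l.map f := by
  induction l generalizing acc with
  | nil => simp
  | cons a t ih => simp [ih, List.foldl]

theorem group_and_combine_spec' (lst : List (Int × String)) :
    group_and_combine lst = group_and_combine_alt lst := by
  unfold group_and_combine group_and_combine_alt
  dsimp only
  have hd : lst.foldl (fun d p =>
      if d.contains p.1 then d.insert p.1 (d.getD p.1 [] ++ [p.2])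
      else d.insert p.1 [p.2]) PySem.Dict.empty
      = lst.foldl (fun d p => d.modify p.1 [] (· ++ [p.2])) PySem.Dict.empty := by
    congr 1; funext d p; exact stepA_eq_modify d p
  have hs : lst.foldl (fun seen p => if p.1 ∈ seen then seen else seen ++ [p.1]) ([] : List Int)
      = lst.foldl (fun seen p => PySem.Set.add seen p.1) [] := by
    congr 1; funext s p; exact stepB_eq_add s p.1
  rw [hd, hs]
  set D := lst.foldl (fun d p => d.modify p.1 [] (· ++ [p.2])) PySem.Dict.empty with hD
  have hnd : D.keys.Nodup := by
    rw [hD]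
    exact PySem.Dict.nodup_keys_foldl_modify_key lst (·.1) [] (fun _ p => (· ++ [p.2])) _
      PySem.Dict.nodup_keys_empty
  have hkeys : D.keys = lst.foldl (fun seen p => PySem.Set.add seen p.1) [] := by
    rw [hD, PySem.Dict.keys_foldl_modify_key]
    rw [← PySem.Set.update_map_eq_foldl_add]
    simp [PySem.Dict.keys_empty]
  have hitems : D.items = D.keys.map (fun k => (k, D.getD k [])) :=
    PySem.Dict.items_eq_map_keys D hnd []
  have hgetD : ∀ k, D.getD k [] = (lst.filter (fun p => p.1 == k)).map (·.2) := by
    intro k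
    rw [hD]
    have := PySem.Dict.getD_foldl_modify_append (d := PySem.Dict.empty) (l := lst) (c := k)
    simpa using this
  rw [hitems, foldl_append_map, foldl_append_map, List.map_map, ← hkeys]
  simp only [List.nil_append]
  apply List.map_congr_left
  intro k _
  simp [hgetD k]

-- ===== VERDICT (by name: the statement is the Claim_ definition above) =====
theorem group_and_combine_spec : Claim_equal_group_and_combine := by
  intro lst _
  exact group_and_combine_spec' lst
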